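-- pv_equiv track=rewrite | github.com/pypi-data/pypi-mirror-386 | packages/vodiboi-state-space-visualizer/vodiboi_state_space_visualizer-0.1.6-py3-none-any.whl/vodiboi_state_space_visualizer/games/aztec_diamond.py | make_cells
-- ===== SOURCE A (Python) =====
-- from typing import FrozenSet, Set, List, Tuple
--
-- Cell = Tuple[int, int]
--
-- def make_cells(n: int) -> Set[Cell]:
--     """Create the order n Aztec diamond with 2*n*(n+1) cells."""
--     cells = set()
--     for r in range(2*n):
--         j = r - (n - 1)
--         m = min(r, 2*n - 1 - r)
--         L = 2 * (m + 1)
--         k = L // 2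
--         for i in range(-k, k):
--             cells.add((i, j))
--     return cells
-- ===== SOURCE B (Python) =====
-- def make_cells(n: int):
--     """Create the order n Aztec diamond with 2*n*(n+1) cells.
--
--     Closed form: cell (i, j) lies in the diamond iff |2*i+1| + |2*j-1| <= 2*n,
--     i.e. the cell centre (i+0.5, j-0.5) is within L1 distance n of the origin.
--     """
--     return {(i, j)
--             for j in range(-(n - 1), n + 1)
--             for i in range(-n, n)
--             if abs(2 * i + 1) + abs(2 * j - 1) <= 2 * n}
-- ===== Notes on version B (the rewrite author's own statement) =====
-- stated objective: idiomatic
-- what changed: Replaces A's per-row width computation (m = min(r, 2n-1-r), half-width k) with a single set comprehension over the bounding box filtered by the closed-form membership inequality |2i+1| + |2j-1| <= 2n.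
import Mathlib
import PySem

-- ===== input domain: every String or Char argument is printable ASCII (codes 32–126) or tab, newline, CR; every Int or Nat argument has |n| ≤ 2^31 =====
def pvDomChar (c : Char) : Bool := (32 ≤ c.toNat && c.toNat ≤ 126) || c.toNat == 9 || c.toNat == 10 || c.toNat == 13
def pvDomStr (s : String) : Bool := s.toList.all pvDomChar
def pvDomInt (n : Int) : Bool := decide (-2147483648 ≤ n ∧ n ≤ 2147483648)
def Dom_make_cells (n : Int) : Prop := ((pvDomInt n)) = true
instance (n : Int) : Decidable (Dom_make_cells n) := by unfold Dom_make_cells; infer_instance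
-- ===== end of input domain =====

-- B replaces A's per-row width computation with a predicate-filtered scan of the
-- bounding box using the closed-form membership test |2i+1| + |2j-1| ≤ 2n (idiomatic, same cost).

-- ===== PORT A =====
def make_cells (n : Int) : List (Int × Int) :=
  (PySem.List.pyRange 0 (2*n) 1).foldl (fun cells r =>
    let j := r - (n - 1)
    let m := min r (2*n - 1 - r)
    let L := 2 * (m + 1)
    let k := PySem.Int.floordiv L 2
    (PySem.List.pyRange (-k) k 1).foldl (fun c i => PySem.Set.add c (i, j)) cells)
  PySem.Set.empty

-- ===== PORT B =====
def make_cells_alt (n : Int) : List (Int × Int) :=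
  (PySem.List.pyRange (-(n - 1)) (n + 1) 1).foldl (fun cells j =>
    (PySem.List.pyRange (-n) n 1).foldl (fun c i =>
      if |2*i + 1| + |2*j - 1| ≤ 2*n then PySem.Set.add c (i, j) else c) cells)
  PySem.Set.empty

-- ===== PRECONDITION & SPEC =====
def Spec_make_cells (n : Int) (out : List (Int × Int)) : Prop := out = make_cells_alt n
instance (n : Int) (out : List (Int × Int)) : Decidable (Spec_make_cells n out) := by unfold Spec_make_cells; infer_instance

-- ===== CLAIM (what is proved, stated in full; the proofs are below) =====
def Claim_equal_make_cells : Prop := ∀ (n : Int), Dom_make_cells n → Spec_make_cells n (make_cells n)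

-- ===== LEMMAS AND PROOFS =====

-- A's row r, as the list of cells it contributes (in insertion order)
def pvRowA (n r : Int) : List (Int × Int) :=
  (PySem.List.pyRange (-(min r (2*n - 1 - r) + 1)) (min r (2*n - 1 - r) + 1) 1).map
    (fun i => (i, r - (n - 1)))

-- B's row j, as the list of cells it contributes (in insertion order)
def pvRowB (n j : Int) : List (Int × Int) :=
  ((PySem.List.pyRange (-n) n 1).filter (fun i => decide (|2*i + 1| + |2*j - 1| ≤ 2*n))).map
    (fun i => (i, j))

-- folding Set.update over a list of rows whose concatenation is duplicate-free just concatenates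
theorem pvRowsFold {α : Type} [BEq α] [LawfulBEq α] (rows : List (List α)) (acc : List α)
    (h : (acc ++ rows.flatten).Nodup) :
    rows.foldl (fun c row => PySem.Set.update c row) acc = acc ++ rows.flatten := by
  induction rows generalizing acc with
  | nil => simp
  | cons row rest ih =>
    simp only [List.flatten_cons] at h
    rw [← List.append_assoc] at h
    have h' := (List.nodup_append.mp (List.nodup_append.mp h).1)
    have hrow : row.Nodup := h'.2.1
    have hdisj : ∀ x ∈ row, x ∉ acc := fun x hx hxa => h'.2.2 _ hxa _ hx rfl
    simp only [List.foldl_cons]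
    rw [PySem.Set.update_eq_append_of_disjoint (s := acc) (xs := row) hrow hdisj,
      ih _ h, List.append_assoc]
    simp

-- if-guarded fold is the fold over the filtered list
theorem pvFoldlFilter {α β : Type} (l : List β) (p : β → Bool) (f : α → β → α) (init : α) :
    l.foldl (fun a b => if p b then f a b else a) init = (l.filter p).foldl f init := by
  induction l generalizing init with
  | nil => rfl
  | cons x xs ih =>
    by_cases hp : p x <;> simp [hp, ih]

theorem pvNodupRows (rows : List (List (Int × Int)))
    (hnd : ∀ row ∈ rows, row.Nodup)
    (hpw : rows.Pairwise (fun r s => ∀ x ∈ r, ∀ y ∈ s, (x : Int × Int).2 ≠ (y : Int × Int).2)) :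
    rows.flatten.Nodup := by
  rw [List.nodup_flatten]
  exact ⟨hnd, hpw.imp (fun {a b} hab => List.disjoint_left.mpr
    (fun {x} hx hx' => hab x hx x hx' rfl))⟩

-- A in flatMap normal form
theorem pvA_norm (n : Int) :
    make_cells n = ((PySem.List.pyRange 0 (2*n) 1).map (pvRowA n)).flatten := by
  unfold make_cells
  have hbody : ∀ (c : List (Int × Int)), ∀ r ∈ PySem.List.pyRange 0 (2*n) 1,
      (PySem.List.pyRange (-(PySem.Int.floordiv (2*(min r (2*n - 1 - r) + 1)) 2))
        (PySem.Int.floordiv (2*(min r (2*n - 1 - r) + 1)) 2) 1).foldl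
        (fun c i => PySem.Set.add c (i, r - (n - 1))) c
      = PySem.Set.update c (pvRowA n r) := by
    intro c r _
    have hfd : PySem.Int.floordiv (2*(min r (2*n - 1 - r) + 1)) 2 = min r (2*n - 1 - r) + 1 := by
      simp [PySem.Int.floordiv]
    rw [hfd, pvRowA, PySem.Set.update_map_eq_foldl_add]
  rw [List.foldl_ext _ _ _ hbody, ← List.foldl_map]
  exact pvRowsFold _ [] (by
    simp only [List.nil_append]
    apply pvNodupRows
    · intro row hrow
      obtain ⟨r, _, rfl⟩ := List.mem_map.mp hrow
      exact (PySem.List.nodup_pyRange_one _ _).map (fun a b h => by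
        simpa using congrArg Prod.fst h)
    · rw [List.pairwise_map]
      refine (PySem.List.pairwise_lt_pyRange_one 0 (2*n)).imp ?_
      intro a b hab x hx y hy
      simp only [pvRowA, List.mem_map] at hx hy
      obtain ⟨i, _, rfl⟩ := hx
      obtain ⟨i', _, rfl⟩ := hy
      simp only
      omega)

-- B in flatMap normal form
theorem pvB_norm (n : Int) :
    make_cells_alt n = ((PySem.List.pyRange (-(n - 1)) (n + 1) 1).map (pvRowB n)).flatten := by
  unfold make_cells_alt
  have hbody : ∀ (c : List (Int × Int)), ∀ j ∈ PySem.List.pyRange (-(n - 1)) (n + 1) 1,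
      (PySem.List.pyRange (-n) n 1).foldl
        (fun c i => if |2*i + 1| + |2*j - 1| ≤ 2*n then PySem.Set.add c (i, j) else c) c
      = PySem.Set.update c (pvRowB n j) := by
    intro c j _
    have heq : (fun (c : List (Int × Int)) (i : Int) =>
        if |2*i + 1| + |2*j - 1| ≤ 2*n then PySem.Set.add c (i, j) else c)
      = (fun c i => if decide (|2*i + 1| + |2*j - 1| ≤ 2*n) = true
          then PySem.Set.add c (i, j) else c) := by
      funext c i
      by_cases h : |2*i + 1| + |2*j - 1| ≤ 2*n <;> simp [h]
    rw [heq, pvFoldlFilter, pvRowB, PySem.Set.update_map_eq_foldl_add]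
  rw [List.foldl_ext _ _ _ hbody, ← List.foldl_map]
  exact pvRowsFold _ [] (by
    simp only [List.nil_append]
    apply pvNodupRows
    · intro row hrow
      obtain ⟨j, _, rfl⟩ := List.mem_map.mp hrow
      exact (List.Nodup.filter _ (PySem.List.nodup_pyRange_one _ _)).map (fun a b h => by
        simpa using congrArg Prod.fst h)
    · rw [List.pairwise_map]
      refine (PySem.List.pairwise_lt_pyRange_one (-(n-1)) (n+1)).imp ?_
      intro a b hab x hx y hy
      simp only [pvRowB, List.mem_map] at hx hy
      obtain ⟨i, _, rfl⟩ := hx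
      obtain ⟨i', _, rfl⟩ := hy
      simp only
      omega)

-- per-row agreement: B's filtered row at j = r-(n-1) is exactly A's row at r
theorem pvRow_eq (n r : Int) (h0 : 0 ≤ r) (h2 : r < 2*n) :
    pvRowB n (r - (n - 1)) = pvRowA n r := by
  set k := min r (2*n - 1 - r) + 1 with hk
  have hk1 : 1 ≤ k := by omega
  have hkn : k ≤ n := by omega
  have hpred : ∀ i : Int,
      (|2*i + 1| + |2*(r - (n - 1)) - 1| ≤ 2*n) ↔ (-k ≤ i ∧ i < k) := by
    intro i
    rcases abs_cases (2*i + 1) with ⟨e1, _⟩ | ⟨e1, _⟩ <;>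
      rcases abs_cases (2*(r - (n - 1)) - 1) with ⟨e2, _⟩ | ⟨e2, _⟩ <;>
      rw [e1, e2] <;> omega
  have hfil : (PySem.List.pyRange (-n) n 1).filter
      (fun i => decide (|2*i + 1| + |2*(r - (n - 1)) - 1| ≤ 2*n)) =
      PySem.List.pyRange (-k) k 1 := by
    rw [PySem.List.pyRange_one_append (-n) (-k) n (by omega) (by omega),
        PySem.List.pyRange_one_append (-k) k n (by omega) (by omega),
        List.filter_append, List.filter_append]
    rw [List.filter_eq_nil_iff.mpr (fun a ha => by
        rw [PySem.List.mem_pyRange_one] at ha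
        simp only [decide_eq_true_eq, hpred]
        omega),
      List.filter_eq_self.mpr (fun a ha => by
        rw [PySem.List.mem_pyRange_one] at ha
        simp only [decide_eq_true_eq, hpred]
        omega),
      List.filter_eq_nil_iff.mpr (fun a ha => by
        rw [PySem.List.mem_pyRange_one] at ha
        simp only [decide_eq_true_eq, hpred]
        omega)]
    simp
  rw [pvRowB, pvRowA, hfil]

-- ===== VERDICT (by name: the statement is the Claim_ definition above) =====
theorem make_cells_spec : Claim_equal_make_cells := by
  intro n _
  unfold Spec_make_cells
  rw [pvA_norm, pvB_norm]
  congr 1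
  rw [PySem.List.pyRange_one 0 (2*n), PySem.List.pyRange_one (-(n-1)) (n+1)]
  have hlen : (n + 1 - -(n - 1)) = 2*n - 0 := by ring
  rw [hlen, List.map_map, List.map_map]
  refine List.map_congr_left ?_
  intro k hk
  rw [List.mem_range] at hk
  have hk' : (k : Int) < 2*n := by
    have := hk
    omega
  simp only [Function.comp]
  have : -(n - 1) + (k : Int) = ((0 : Int) + k) - (n - 1) := by ring
  rw [this, pvRow_eq n ((0:Int) + k) (by omega) (by omega)]
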